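-- pv_equiv track=rewrite | github.com/xogichix/scrappping | psc.py | my_reshape
-- ===== SOURCE A (Python) =====
-- from math import ceil
--
-- def my_reshape(arr, cols):
--     rows = ceil(len(arr) / cols)
--     res = []
--     for row in range(rows):
--         current_row = []
--         for col in range(cols):
--             arr_idx = row * cols + col
--             if arr_idx < len(arr):
--                 current_row.append(arr[arr_idx])
--             else:
--                 current_row.append(None)
--         res.append(current_row)
--     return res
-- ===== SOURCE B (Python) =====
-- from math import ceil
--
-- def my_reshape(arr, cols):
--     rows = ceil(len(arr) / cols)
--     padded = list(arr) + [None] * (rows * cols - len(arr))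
--     return [padded[i * cols:(i + 1) * cols] for i in range(rows)]
-- ===== Notes on version B (the rewrite author's own statement) =====
-- stated objective: faster
-- what changed: B pads the input once to a full rows*cols list and stride-slices it into rows, replacing A's per-cell index arithmetic and in-range branch inside nested row/col loops.
import Mathlib
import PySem

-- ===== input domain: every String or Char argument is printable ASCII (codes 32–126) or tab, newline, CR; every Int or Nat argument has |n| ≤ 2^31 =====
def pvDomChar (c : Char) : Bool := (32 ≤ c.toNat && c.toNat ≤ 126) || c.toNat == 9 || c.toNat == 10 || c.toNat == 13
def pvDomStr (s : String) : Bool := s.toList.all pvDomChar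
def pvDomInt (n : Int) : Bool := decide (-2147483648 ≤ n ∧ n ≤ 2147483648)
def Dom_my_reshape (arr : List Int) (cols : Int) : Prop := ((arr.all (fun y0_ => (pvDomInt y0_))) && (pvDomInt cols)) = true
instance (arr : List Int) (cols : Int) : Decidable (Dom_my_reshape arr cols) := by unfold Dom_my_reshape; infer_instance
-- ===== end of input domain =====

-- B pads arr once to rows*cols with None and stride-slices it into rows, instead of A's
-- per-cell index computation with an in-range branch inside nested row/col loops (objective: simpler).


-- ===== PORT A =====
-- ceil(len(arr)/cols): on Dom the float division is exact, so math.ceil(len/cols) = -((-len)//cols).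
def my_reshape (arr : List Int) (cols : Int) : List (List (Option Int)) :=
  let rows : Int := -(PySem.Int.floordiv (-(arr.length : Int)) cols)
  (PySem.List.pyRange 0 rows 1).foldl (fun res row =>
    let current_row : List (Option Int) :=
      (PySem.List.pyRange 0 cols 1).foldl (fun cur col =>
        let arr_idx := row * cols + col
        -- arr[arr_idx] is only evaluated under arr_idx < len(arr), where pyGet? = some arr[arr_idx]
        cur ++ [if arr_idx < (arr.length : Int) then PySem.List.pyGet? arr arr_idx else none]) []
    res ++ [current_row]) []

-- ===== PORT B =====
def my_reshape_alt (arr : List Int) (cols : Int) : List (List (Option Int)) :=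
  let rows : Int := -(PySem.Int.floordiv (-(arr.length : Int)) cols)
  -- [None] * k is empty for k ≤ 0, hence the .toNat
  let padded : List (Option Int) :=
    arr.map some ++ List.replicate (rows * cols - (arr.length : Int)).toNat none
  (PySem.List.pyRange 0 rows 1).map (fun i =>
    PySem.List.slice padded (some (i * cols)) (some ((i + 1) * cols)))

-- ===== PRECONDITION & SPEC =====
-- A raises ZeroDivisionError iff cols == 0
def Pre_my_reshape (arr : List Int) (cols : Int) : Prop := cols ≠ 0
instance (arr : List Int) (cols : Int) : Decidable (Pre_my_reshape arr cols) := by unfold Pre_my_reshape; infer_instance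
def pvWitness_my_reshape : List Int × Int := ([1, 2, 3, 4, 5], 2)

def Spec_my_reshape (arr : List Int) (cols : Int) (out : List (List (Option Int))) : Prop := out = my_reshape_alt arr cols
instance (arr : List Int) (cols : Int) (out : List (List (Option Int))) : Decidable (Spec_my_reshape arr cols out) := by unfold Spec_my_reshape; infer_instance

-- ===== CLAIM (what is proved, stated in full; the proofs are below) =====
def Claim_equal_my_reshape : Prop := ∀ (arr : List Int) (cols : Int), Dom_my_reshape arr cols → Pre_my_reshape arr cols → Spec_my_reshape arr cols (my_reshape arr cols)

-- ===== LEMMAS AND PROOFS =====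

-- rows ≤ 0 when cols < 0 (then both programs return [])
lemma rows_nonpos_of_neg (arr : List Int) (cols : Int) (hc : cols < 0) :
    -(PySem.Int.floordiv (-(arr.length : Int)) cols) ≤ 0 := by
  have h1 := PySem.Int.floordiv_mul_add_mod (-(arr.length : Int)) cols
  have h2 := PySem.Int.mod_neg_bounds (-(arr.length : Int)) hc
  have hn : (0 : Int) ≤ (arr.length : Int) := Int.natCast_nonneg _
  nlinarith [h2.1, h2.2]

-- rows = ⌈n/c⌉ as a natural number when cols > 0
lemma rows_eq_of_pos (arr : List Int) (cols : Int) (hc : 0 < cols) :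
    -(PySem.Int.floordiv (-(arr.length : Int)) cols)
      = ((arr.length + cols.toNat - 1) / cols.toNat : Nat) := by
  rw [PySem.Int.neg_floordiv_neg_eq_iff_of_pos hc]
  set n := arr.length
  set c := cols.toNat with hcdef
  set q := (n + c - 1) / c with hq
  have hc' : cols = (c : Int) := by omega
  have hcpos : 0 < c := by omega
  have h1 : q * c ≤ n + c - 1 := Nat.div_mul_le_self _ _
  have h2 : n + c - 1 < q * c + c := by
    have ha := Nat.div_add_mod (n + c - 1) c
    rw [← hq] at ha
    have hb := Nat.mod_lt (n + c - 1) hcpos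
    have hd : q * c = c * q := Nat.mul_comm _ _
    omega
  have h1' : (q : Int) * c ≤ (n : Int) + c - 1 := by
    have : ((q * c : Nat) : Int) ≤ ((n + c - 1 : Nat) : Int) := by exact_mod_cast h1
    push_cast at this; omega
  have h2' : (n : Int) + c - 1 < (q : Int) * c + c := by
    have : ((n + c - 1 : Nat) : Int) < ((q * c + c : Nat) : Int) := by exact_mod_cast h2
    push_cast at this; omega
  rw [hc']
  constructor
  · nlinarith
  · nlinarith

-- one padded row of B equals A's per-cell construction of that row
lemma row_eq (arr : List Int) (c r i : Nat) (hn : arr.length ≤ r * c) (hi : i < r) :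
    (List.range c).map (fun (k : Nat) =>
        if (((i * c : Nat) : Int) + (k : Int)) < (arr.length : Int)
        then PySem.List.pyGet? arr (((i * c : Nat) : Int) + (k : Int)) else none)
    = List.take c (List.drop (i * c)
        (arr.map some ++ List.replicate (r * c - arr.length) (none : Option Int))) := by
  have haux : i * c + c ≤ r * c := by nlinarith
  apply List.ext_getElem
  · simp only [List.length_map, List.length_range, List.length_take, List.length_drop,
      List.length_append, List.length_replicate]
    omega
  · intro k h1 h2
    simp only [List.length_map, List.length_range] at h1
    have hk : k < (List.range c).length := by simpa using h1
    have hcast : ((i * c : Nat) : Int) + (((List.range c)[k]'hk : Nat) : Int)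
        = ((i * c + k : Nat) : Int) := by
      rw [List.getElem_range]; push_cast; ring
    simp only [List.getElem_map, List.getElem_take, List.getElem_drop, hcast,
      PySem.List.pyGet?_natCast]
    by_cases h : i * c + k < arr.length
    · rw [if_pos (by exact_mod_cast h),
        List.getElem_append_left (by simpa using h),
        List.getElem_map, List.getElem?_eq_getElem h]
    · rw [if_neg (by exact_mod_cast h),
        List.getElem_append_right (by simpa using h),
        List.getElem_replicate]

theorem my_reshape_spec : Claim_equal_my_reshape := by
  intro arr cols _ hpre
  unfold Spec_my_reshape
  rcases lt_or_gt_of_ne hpre with hneg | hpos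
  · have hz : PySem.List.pyRange 0 (-(PySem.Int.floordiv (-(arr.length : Int)) cols)) 1 = [] :=
      PySem.List.pyRange_one_eq_nil (by have := rows_nonpos_of_neg arr cols hneg; omega)
    simp [my_reshape, my_reshape_alt, hz]
  · simp only [my_reshape, my_reshape_alt]
    have hcols : cols = ((cols.toNat : Nat) : Int) := by omega
    set n := arr.length with hn
    set c := cols.toNat with hc
    set r := (n + c - 1) / c with hr
    have hrw := rows_eq_of_pos arr cols hpos
    rw [← hn, ← hc, ← hr] at hrw
    have hcpos : 0 < c := by omega
    have hnle : n ≤ r * c := by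
      have h1 := Nat.div_add_mod (n + c - 1) c
      rw [← hr] at h1
      have h2 := Nat.mod_lt (n + c - 1) hcpos
      have h3 : r * c = c * r := Nat.mul_comm _ _
      omega
    have hpad : ((r : Int) * (c : Int) - (n : Int)).toNat = r * c - n := by
      have hx : (r : Int) * (c : Int) = ((r * c : Nat) : Int) := by push_cast; ring
      rw [hx]; omega
    rw [hrw, hcols]
    simp only [hpad, PySem.List.pyRange_zero_natCast,
      PySem.List.foldl_append_singleton_eq_map, List.nil_append, List.map_map]
    apply List.map_congr_left
    intro i hi
    have hi' : i < r := List.mem_range.mp hi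
    simp only [Function.comp_def]
    have h1 : ((i : Nat) : Int) * (c : Int) = ((i * c : Nat) : Int) := by push_cast; ring
    have h2 : (((i : Nat) : Int) + 1) * (c : Int) = ((i * c : Nat) : Int) + ((c : Nat) : Int) := by
      push_cast; ring
    rw [h1, h2, PySem.List.slice_natCast_add]
    rw [← row_eq arr c r i hnle hi', hn]

-- ===== VERDICT (by name: the statement is the Claim_ definition above) =====
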